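-- pv_equiv track=rewrite | github.com/comjayoncloud/study-python | CodingTest/프로그래머스/코딩테스트입문100제 - 레벨0/햄버거만들기.py | solution
-- ===== SOURCE A (Python) =====
-- def solution(ingredient):
--     answer = 0
--
--     stack=[]
--     for i in ingredient:
--         stack.append(i)
--         if stack[-4:]==[1,2,3,1]:
--             answer+=1
--             for k in range(4):
--                 stack.pop()
--
--     return answer
-- ===== SOURCE B (Python) =====
-- def _remove_first(lst):
--     # first index i with lst[i:i+4] == [1,2,3,1]; delete those four, else None
--     for i in range(len(lst) - 3):
--         if lst[i] == 1 and lst[i + 1] == 2 and lst[i + 2] == 3 and lst[i + 3] == 1: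
--             return lst[:i] + lst[i + 4:]
--     return None
--
-- def solution(ingredient):
--     cur = list(ingredient)
--     count = 0
--     while True:
--         nxt = _remove_first(cur)
--         if nxt is None:
--             return count
--         cur = nxt
--         count += 1
-- ===== Notes on version B (the rewrite author's own statement) =====
-- stated objective: alternative
-- what changed: Replaces the single left-to-right stack pass with a repeated scan-and-remove loop: find the leftmost contiguous [1,2,3,1] window, delete it, count, and rescan until none remains.
import Mathlib
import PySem

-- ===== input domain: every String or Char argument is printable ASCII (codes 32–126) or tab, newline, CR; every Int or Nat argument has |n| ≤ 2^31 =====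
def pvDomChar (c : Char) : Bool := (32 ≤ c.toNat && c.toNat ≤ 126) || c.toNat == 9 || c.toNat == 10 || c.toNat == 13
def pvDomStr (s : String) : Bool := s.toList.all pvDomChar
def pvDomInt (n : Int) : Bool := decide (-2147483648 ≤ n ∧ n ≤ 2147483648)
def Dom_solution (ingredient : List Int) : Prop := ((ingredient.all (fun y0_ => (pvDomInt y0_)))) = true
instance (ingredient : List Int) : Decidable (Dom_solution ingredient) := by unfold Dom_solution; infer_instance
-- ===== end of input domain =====

-- B replaces A's single stack pass with a repeated leftmost-scan-and-remove loop (alternative decomposition, same exact result).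

-- ===== PORT A =====
-- one loop iteration: append i, and if stack[-4:] == [1,2,3,1], count and pop four times
def solStep (st : List Int × Int) (i : Int) : List Int × Int :=
  let stack := st.1 ++ [i]
  if PySem.List.slice stack (some (-4)) none = [1, 2, 3, 1] then
    -- for k in range(4): stack.pop()   (pop on a list of length ≥ 4 removes the last element)
    ((PySem.List.pyRange 0 4 1).foldl (fun s _ => s.dropLast) stack, st.2 + 1)
  else (stack, st.2)

def solution (ingredient : List Int) : Int :=
  (ingredient.foldl solStep ([], 0)).2

-- ===== PORT B =====
-- _remove_first: scan left to right for the first window equal to [1,2,3,1]; delete those four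
def removeFirst : List Int → Option (List Int)
  | [] => none
  | x :: xs =>
    if (x :: xs).take 4 = [1, 2, 3, 1] then some (xs.drop 3)
    else (removeFirst xs).map (x :: ·)

-- termination measure of B's while-loop: each removal shrinks the list by four
theorem removeFirst_length {l l' : List Int} (h : removeFirst l = some l') :
    l'.length + 4 = l.length := by
  induction l generalizing l' with
  | nil => simp [removeFirst] at h
  | cons x xs ih =>
    simp only [removeFirst] at h
    split at h
    · rename_i hp
      cases h
      have : xs.length ≥ 3 := by
        have := congrArg List.length hp
        simp at this
        omega
      simp
      omega
    · cases hm : removeFirst xs with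
      | none => simp [hm] at h
      | some t =>
        simp [hm] at h
        subst h
        have := ih hm
        simp
        omega

-- the while-loop: remove the leftmost occurrence and repeat, counting
def altCount (l : List Int) : Int :=
  match h : removeFirst l with
  | none => 0
  | some l' => 1 + altCount l'
termination_by l.length
decreasing_by
  have := removeFirst_length h
  omega

def solution_alt (ingredient : List Int) : Int := altCount ingredient

-- ===== PRECONDITION & SPEC =====
def Spec_solution (ingredient : List Int) (out : Int) : Prop := out = solution_alt ingredient
instance (ingredient : List Int) (out : Int) : Decidable (Spec_solution ingredient out) := by unfold Spec_solution; infer_instance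

-- ===== CLAIM (what is proved, stated in full; the proofs are below) =====
def Claim_equal_solution : Prop := ∀ (ingredient : List Int), Dom_solution ingredient → Spec_solution ingredient (solution ingredient)

-- ===== LEMMAS AND PROOFS =====

theorem altCount_none {l : List Int} (h : removeFirst l = none) : altCount l = 0 := by
  rw [altCount]; split <;> simp_all

theorem altCount_some {l l' : List Int} (h : removeFirst l = some l') :
    altCount l = 1 + altCount l' := by
  rw [altCount]; split <;> simp_all

-- removeFirst finds nothing iff the list has no contiguous occurrence of [1,2,3,1]
theorem removeFirst_none_iff (l : List Int) :
    removeFirst l = none ↔ ∀ u d : List Int, l ≠ u ++ 1 :: 2 :: 3 :: 1 :: d := by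
  induction l with
  | nil =>
    constructor
    · intro _ u d h
      have := congrArg List.length h
      simp at this
    · intro _
      rfl
  | cons x xs ih =>
    simp only [removeFirst]
    by_cases hp : (x :: xs).take 4 = [1, 2, 3, 1]
    · rw [if_pos hp]
      constructor
      · intro h; exact absurd h (by simp)
      · intro h
        exfalso
        apply h [] ((x :: xs).drop 4)
        conv_lhs => rw [← List.take_append_drop 4 (x :: xs)]
        rw [hp]
        simp
    · rw [if_neg hp, Option.map_eq_none_iff, ih]
      constructor
      · intro h u d he
        cases u with
        | nil =>
          apply hp
          simp only [List.nil_append] at he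
          rw [he]
          simp
        | cons y u' =>
          simp only [List.cons_append, List.cons.injEq] at he
          exact h u' d he.2
      · intro h u d he
        exact h (x :: u) d (by simpa using he)

-- an occurrence inside a prefix is an occurrence of the whole
theorem removeFirst_none_prefix {u v : List Int} (h : removeFirst (u ++ v) = none) :
    removeFirst u = none := by
  rw [removeFirst_none_iff] at h ⊢
  intro a d he
  exact h a (d ++ v) (by rw [he]; simp)

-- inserting the pattern after a clean prefix: removeFirst deletes exactly it
theorem removeFirst_insert {u : List Int} (hu : removeFirst (u ++ [1, 2, 3]) = none)
    (d : List Int) :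
    removeFirst (u ++ 1 :: 2 :: 3 :: 1 :: d) = some (u ++ d) := by
  induction u with
  | nil =>
    simp [removeFirst]
  | cons a u ih =>
    have htail : removeFirst (u ++ [1, 2, 3]) = none := by
      simp only [List.cons_append, removeFirst] at hu
      split at hu
      · exact absurd hu (by simp)
      · simpa using hu
    have hrest := ih htail
    rw [removeFirst_none_iff] at hu
    simp only [List.cons_append, removeFirst]
    have hp : ¬ (a :: (u ++ 1 :: 2 :: 3 :: 1 :: d)).take 4 = [1, 2, 3, 1] := by
      intro hp
      rcases u with _ | ⟨b, _ | ⟨c, _ | ⟨e, u'⟩⟩⟩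
      · simp at hp
      · simp at hp
      · simp only [List.cons_append, List.nil_append, List.take, List.cons.injEq] at hp
        obtain ⟨h1, h2, h3, -⟩ := hp
        exact hu [] [2, 3] (by simp [h1, h2, h3])
      · simp only [List.cons_append, List.take, List.cons.injEq] at hp
        obtain ⟨h1, h2, h3, h4, -⟩ := hp
        exact hu [] (u' ++ [1, 2, 3]) (by simp [h1, h2, h3, h4])
    rw [if_neg hp, hrest]
    simp

-- A's pop-four loop on a stack ending in four elements
theorem pop4_eq (u : List Int) (a b c d : Int) :
    (PySem.List.pyRange 0 4 1).foldl (fun s _ => s.dropLast) (u ++ [a, b, c, d]) = u := by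
  have h4 : PySem.List.pyRange 0 4 1 = [0, 1, 2, 3] := by decide
  rw [h4]
  simp

-- the slice condition stack[-4:] == [1,2,3,1] characterised
theorem slice_last4_eq {l : List Int} :
    PySem.List.slice l (some (-4)) none = [1, 2, 3, 1] ↔
      ∃ u : List Int, l = u ++ [1, 2, 3, 1] := by
  rw [PySem.List.slice_from_neg_ofNat l 4 (by omega)]
  constructor
  · intro h
    refine ⟨l.take (l.length - 4), ?_⟩
    rw [← h, List.take_append_drop]
  · rintro ⟨u, rfl⟩
    have hl : (u ++ [(1:Int), 2, 3, 1]).length - 4 = u.length := by simp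
    rw [hl, List.drop_left]

-- main invariant: running A's loop from a clean stack counts B's removals of stack ++ rest
theorem key (xs : List Int) : ∀ (s : List Int) (a : Int), removeFirst s = none →
    (xs.foldl solStep (s, a)).2 = a + altCount (s ++ xs) := by
  induction xs with
  | nil =>
    intro s a hs
    simp [altCount_none hs]
  | cons x xs ih =>
    intro s a hs
    rw [List.foldl_cons]
    by_cases hc : PySem.List.slice (s ++ [x]) (some (-4)) none = [1, 2, 3, 1]
    · obtain ⟨u, hu⟩ := slice_last4_eq.mp hc
      have hu' : s ++ [x] = (u ++ [1, 2, 3]) ++ [1] := by rw [hu]; simp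
      obtain ⟨hs1, hx1⟩ := List.append_inj' hu' (by simp)
      have hx : x = 1 := by simpa using hx1
      have hstep : solStep (s, a) x = (u, a + 1) := by
        simp only [solStep]
        rw [if_pos hc, hu, pop4_eq]
      have hcleanu : removeFirst u = none :=
        removeFirst_none_prefix (v := [1, 2, 3]) (by rw [← hs1]; exact hs)
      rw [hstep, ih u (a + 1) hcleanu]
      have hocc : removeFirst (s ++ x :: xs) = some (u ++ xs) := by
        rw [hs1, hx]
        have he : (u ++ [(1:Int), 2, 3]) ++ 1 :: xs = u ++ 1 :: 2 :: 3 :: 1 :: xs := by simp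
        rw [he]
        exact removeFirst_insert (by rw [← hs1]; exact hs) xs
      rw [altCount_some hocc]
      ring
    · have hstep : solStep (s, a) x = (s ++ [x], a) := by
        simp only [solStep]
        rw [if_neg hc]
      have hclean : removeFirst (s ++ [x]) = none := by
        rw [removeFirst_none_iff] at hs ⊢
        intro u d he
        cases d with
        | nil =>
          exact hc (slice_last4_eq.mpr ⟨u, by simpa using he⟩)
        | cons y d' =>
          have hdl := congrArg List.dropLast he
          simp at hdl
          exact hs u _ hdl
      rw [hstep, ih (s ++ [x]) a hclean]
      simp

-- ===== VERDICT (by name: the statement is the Claim_ definition above) =====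
theorem solution_spec : Claim_equal_solution := by
  intro ingredient _
  show solution ingredient = solution_alt ingredient
  unfold solution solution_alt
  simpa using key ingredient [] 0 (by rfl)
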